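-- pv_equiv track=rewrite | github.com/ECSC2024/openECSC-2024 | round-4/rev03/src/gen.py | treefy
-- ===== SOURCE A (Python) =====
-- def treefy(data):
--     if len(data) == 1:
--         return f"!Quadruple{str(data[0])}"
--     else:
--         # split into binary tree
--         mid = len(data) // 2
--         left = treefy(data[:mid])
--         right = treefy(data[mid:])
--         return f"![{left}, {right}]"
-- ===== SOURCE B (Python) =====
-- def treefy(data):
--     # Iterative DFS over index intervals with an explicit stack, emitting
--     # tokens into a list and joining once; no list slicing or recursion.
--     parts = []
--     stack = [(0, len(data))]
--     while stack:
--         item = stack.pop()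
--         if isinstance(item, str):
--             parts.append(item)
--         else:
--             lo, hi = item
--             if hi - lo == 1:
--                 parts.append("!Quadruple" + str(data[lo]))
--             else:
--                 mid = lo + (hi - lo) // 2
--                 stack.append("]")
--                 stack.append((mid, hi))
--                 stack.append(", ")
--                 stack.append((lo, mid))
--                 stack.append("![")
--     return "".join(parts)
-- ===== Notes on version B (the rewrite author's own statement) =====
-- stated objective: alternative
-- what changed: Replaces the recursive slice-and-concatenate construction by an iterative explicit-stack DFS over index intervals that emits tokens into a list and joins once, with no list slicing or recursion.
-- outside the precondition, e.g. on treefy([]): A raises RecursionError, B does not finish within the time limit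
import Mathlib
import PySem

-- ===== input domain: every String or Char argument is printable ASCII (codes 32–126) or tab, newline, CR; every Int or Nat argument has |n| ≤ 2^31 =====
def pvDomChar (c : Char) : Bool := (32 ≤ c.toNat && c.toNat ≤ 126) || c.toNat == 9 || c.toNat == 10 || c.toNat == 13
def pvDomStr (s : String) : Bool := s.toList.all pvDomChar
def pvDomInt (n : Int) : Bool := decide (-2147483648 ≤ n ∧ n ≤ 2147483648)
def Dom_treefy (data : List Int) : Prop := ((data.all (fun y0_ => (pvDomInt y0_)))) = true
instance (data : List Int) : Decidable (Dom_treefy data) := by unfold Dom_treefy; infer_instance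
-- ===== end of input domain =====

-- B replaces A's recursive slice-and-concatenate by an iterative explicit-stack DFS over
-- index intervals emitting tokens joined once (objective: alternative; return value only).

-- ===== PORT A =====
-- A recurses on slices; on [] it recurses forever (Python: RecursionError), so the port
-- carries a fuel argument that is sufficient (fuel = length) on every input in Pre_.
def treefyFuelA (data : List Int) : Nat → List Int → List Char
  | 0, _ => []
  | fuel + 1, d =>
    if d.length == 1 then
      "!Quadruple".toList ++ PySem.Int.toChars (d.getD 0 0)
    else
      let mid := d.length / 2
      let left := treefyFuelA data fuel (PySem.List.slice d none (some (mid : Int)))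
      let right := treefyFuelA data fuel (PySem.List.slice d (some (mid : Int)) none)
      "![".toList ++ left ++ ", ".toList ++ right ++ "]".toList

def treefy (data : List Int) : String :=
  String.ofList (treefyFuelA data data.length data)

-- ===== PORT B =====
-- stack items: either an index interval [lo, hi) of data, or a literal token
inductive TItem where
  | seg (lo hi : Nat)
  | lit (s : List Char)
deriving DecidableEq, Repr

-- the while loop of Source B; Python's unbounded while becomes fuel recursion
-- (fuel = 5 * len suffices: the loop pops exactly 5*n - 4 items on a nonempty input)
def treefyAltLoop (data : List Int) : Nat → List TItem → List (List Char) → List (List Char)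
  | 0, _, parts => parts
  | _ + 1, [], parts => parts
  | fuel + 1, item :: stack, parts =>
    match item with
    | .lit s => treefyAltLoop data fuel stack (parts ++ [s])
    | .seg lo hi =>
      if hi - lo == 1 then
        treefyAltLoop data fuel stack
          (parts ++ ["!Quadruple".toList ++ PySem.Int.toChars (data.getD lo 0)])
      else
        let mid := lo + (hi - lo) / 2
        treefyAltLoop data fuel
          (.lit "![".toList :: .seg lo mid :: .lit ", ".toList :: .seg mid hi ::
            .lit "]".toList :: stack) parts

def treefy_alt (data : List Int) : String :=
  String.ofList (PySem.Chars.join []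
    (treefyAltLoop data (5 * data.length) [.seg 0 data.length] []))

-- ===== PRECONDITION & SPEC =====
-- Pre_ excludes only data = [], on which Python A never returns (RecursionError).
def Pre_treefy (data : List Int) : Prop := data ≠ []
instance (data : List Int) : Decidable (Pre_treefy data) := by unfold Pre_treefy; infer_instance
def pvWitness_treefy : List Int := [1, 2, 3]

def Spec_treefy (data : List Int) (out : String) : Prop := out = treefy_alt data
instance (data : List Int) (out : String) : Decidable (Spec_treefy data out) := by unfold Spec_treefy; infer_instance

-- ===== CLAIM (what is proved, stated in full; the proofs are below) =====
def Claim_equal_treefy : Prop := ∀ (data : List Int), Dom_treefy data → Pre_treefy data → Spec_treefy data (treefy data)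

-- ===== LEMMAS AND PROOFS =====

-- "".join(parts) is concatenation
theorem join_empty_sep (xss : List (List Char)) : PySem.Chars.join [] xss = xss.flatten := by
  induction xss with
  | nil => rfl
  | cons a t ih =>
    cases t with
    | nil => simp [PySem.Chars.join, List.intercalate]
    | cons b u =>
      simp only [PySem.Chars.join, List.intercalate, List.intersperse] at ih ⊢
      simp only [List.flatten_cons]
      simp [ih]

-- A's fuel is irrelevant as long as it is at least the length of the (nonempty) list
theorem treefyFuelA_irrel (data : List Int) :
    ∀ (f1 f2 : Nat) (d : List Int), 1 ≤ d.length → d.length ≤ f1 → d.length ≤ f2 →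
      treefyFuelA data f1 d = treefyFuelA data f2 d := by
  intro f1
  induction f1 with
  | zero => intro f2 d h1 h2 _; omega
  | succ g ih =>
    intro f2 d h1 h2 h3
    cases f2 with
    | zero => omega
    | succ h =>
      simp only [treefyFuelA]
      by_cases hl : d.length = 1
      · simp [hl]
      · have hge : 2 ≤ d.length := by omega
        have hmid1 : 1 ≤ d.length / 2 := by omega
        have hmid2 : d.length / 2 ≤ d.length - 1 := by omega
        simp only [hl, beq_iff_eq, if_false,
          PySem.List.slice_to_natCast, PySem.List.slice_from_natCast]
        rw [ih h (d.take (d.length / 2)) (by simp; omega) (by simp; omega) (by simp; omega),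
            ih h (d.drop (d.length / 2)) (by simp; omega) (by simp; omega) (by simp; omega)]

-- one unfolding step of A's port on a list of at least two elements, fuels normalised
theorem treefyFuelA_step (data d : List Int) (fuel : Nat) (h2 : 2 ≤ d.length)
    (hf : d.length ≤ fuel) :
    treefyFuelA data fuel d
      = "![".toList ++ treefyFuelA data (d.length / 2) (d.take (d.length / 2))
          ++ ", ".toList ++ treefyFuelA data (d.length - d.length / 2) (d.drop (d.length / 2))
          ++ "]".toList := by
  obtain ⟨g, rfl⟩ : ∃ g, fuel = g + 1 := ⟨fuel - 1, by omega⟩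
  have hne : ¬ (d.length = 1) := by omega
  simp only [treefyFuelA, beq_iff_eq, hne, if_false,
    PySem.List.slice_to_natCast, PySem.List.slice_from_natCast]
  rw [treefyFuelA_irrel data g (d.length / 2) (d.take (d.length / 2))
        (by simp only [List.length_take]; omega) (by simp only [List.length_take]; omega)
        (by simp only [List.length_take]; omega),
      treefyFuelA_irrel data g (d.length - d.length / 2) (d.drop (d.length / 2))
        (by simp only [List.length_drop]; omega) (by simp only [List.length_drop]; omega)
        (by simp only [List.length_drop]; omega)]

-- the contiguous sub-list of data from index lo (inclusive) to hi (exclusive)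
def extr (data : List Int) (lo hi : Nat) : List Int := (data.drop lo).take (hi - lo)

-- what a stack item contributes to the final output
def renderItem (data : List Int) : TItem → List Char
  | .lit s => s
  | .seg lo hi => treefyFuelA data (hi - lo) (extr data lo hi)

-- number of loop iterations an item will cost (5n-4 for an interval of n ≥ 1 elements)
def wItem : TItem → Nat
  | .lit _ => 1
  | .seg lo hi => 5 * (hi - lo) - 4

def validItem (data : List Int) : TItem → Prop
  | .lit _ => True
  | .seg lo hi => lo < hi ∧ hi ≤ data.length

theorem extr_len (data : List Int) (lo hi : Nat) (_h1 : lo < hi) (h2 : hi ≤ data.length) :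
    (extr data lo hi).length = hi - lo := by
  simp [extr]; omega

theorem treefyAltLoop_spec (data : List Int) :
    ∀ (fuel : Nat) (stack : List TItem) (parts : List (List Char)),
      (stack.map wItem).sum ≤ fuel → (∀ it ∈ stack, validItem data it) →
      (treefyAltLoop data fuel stack parts).flatten
        = parts.flatten ++ (stack.map (renderItem data)).flatten := by
  intro fuel
  induction fuel with
  | zero =>
    intro stack parts hw hv
    cases stack with
    | nil => simp [treefyAltLoop]
    | cons it rest =>
      exfalso
      have hvi := hv it (by simp)
      cases it with
      | lit s => simp [wItem] at hw
      | seg lo hi =>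
        have : lo < hi := hvi.1
        simp [wItem] at hw
        omega
  | succ fuel ih =>
    intro stack parts hw hv
    cases stack with
    | nil => simp [treefyAltLoop]
    | cons it rest =>
      cases it with
      | lit s =>
        simp only [treefyAltLoop]
        rw [ih rest (parts ++ [s]) (by simp [wItem] at hw ⊢; omega)
              (fun x hx => hv x (by simp [hx]))]
        simp [renderItem]
      | seg lo hi =>
        have hvi := hv (.seg lo hi) (by simp)
        obtain ⟨hlt, hle⟩ := hvi
        by_cases h1 : hi - lo = 1
        · have hget : (extr data lo hi)[0]? = data[lo]? := by
            simp [extr, h1, List.getElem?_drop]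
          have hrend : renderItem data (.seg lo hi)
              = "!Quadruple".toList ++ PySem.Int.toChars (data.getD lo 0) := by
            have hlen : (extr data lo hi).length = 1 := by rw [extr_len data lo hi hlt hle]; omega
            simp only [renderItem, h1, treefyFuelA, hlen, beq_self_eq_true, if_true,
              List.getD, hget]
          simp only [treefyAltLoop, h1, beq_self_eq_true, if_true]
          rw [ih rest _ (by simp [wItem] at hw ⊢; omega)
                (fun x hx => hv x (by simp [hx]))]
          simp [hrend]
        · have h2 : 2 ≤ hi - lo := by omega
          have hmlo : lo < lo + (hi - lo) / 2 := by omega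
          have hmhi : lo + (hi - lo) / 2 < hi := by omega
          have hrend : renderItem data (.seg lo hi)
              = "![".toList ++ renderItem data (.seg lo (lo + (hi - lo) / 2))
                  ++ ", ".toList ++ renderItem data (.seg (lo + (hi - lo) / 2) hi)
                  ++ "]".toList := by
            set mid := lo + (hi - lo) / 2 with hmid
            have hlen : (extr data lo hi).length = hi - lo := extr_len data lo hi hlt hle
            have hstep := treefyFuelA_step data (extr data lo hi) (hi - lo)
              (by rw [hlen]; omega) (by rw [hlen])
            rw [hlen] at hstep
            have htake : (extr data lo hi).take ((hi - lo) / 2) = extr data lo mid := by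
              show ((data.drop lo).take (hi - lo)).take ((hi - lo) / 2)
                  = (data.drop lo).take (mid - lo)
              rw [List.take_take, show min ((hi - lo) / 2) (hi - lo) = mid - lo from by omega]
            have hdrop : (extr data lo hi).drop ((hi - lo) / 2) = extr data mid hi := by
              simp only [extr, List.drop_take, List.drop_drop]
              rw [show hi - lo - (hi - lo) / 2 = hi - mid from by omega]
            rw [htake, hdrop] at hstep
            simp only [renderItem]
            rw [show mid - lo = (hi - lo) / 2 from by omega,
                show hi - mid = hi - lo - (hi - lo) / 2 from by omega]
            exact hstep
          have hwn : (List.map wItem (TItem.lit "![".toList :: TItem.seg lo (lo + (hi - lo) / 2)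
              :: TItem.lit ", ".toList :: TItem.seg (lo + (hi - lo) / 2) hi
              :: TItem.lit "]".toList :: rest)).sum ≤ fuel := by
            simp only [List.map_cons, List.sum_cons, wItem] at hw ⊢
            omega
          have hvn : ∀ it ∈ (TItem.lit "![".toList :: TItem.seg lo (lo + (hi - lo) / 2)
              :: TItem.lit ", ".toList :: TItem.seg (lo + (hi - lo) / 2) hi
              :: TItem.lit "]".toList :: rest), validItem data it := by
            intro x hx
            simp only [List.mem_cons] at hx
            rcases hx with h | h | h | h | h | h
            · subst h; trivial
            · subst h; exact ⟨hmlo, by omega⟩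
            · subst h; trivial
            · subst h; exact ⟨hmhi, hle⟩
            · subst h; trivial
            · exact hv x (by simp [h])
          simp only [treefyAltLoop, beq_iff_eq, h1, if_false]
          rw [ih _ parts hwn hvn]
          simp only [List.map_cons, List.flatten_cons]
          rw [hrend]
          simp only [renderItem, List.append_assoc]

theorem extr_full (data : List Int) : extr data 0 data.length = data := by
  simp [extr]

-- ===== VERDICT (by name: the statement is the Claim_ definition above) =====
theorem treefy_spec : Claim_equal_treefy := by
  intro data _ hpre
  have hlen : 1 ≤ data.length := by
    cases data with
    | nil => exact absurd rfl hpre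
    | cons a l => simp
  unfold Spec_treefy treefy treefy_alt
  rw [join_empty_sep]
  congr 1
  rw [treefyAltLoop_spec data (5 * data.length) [.seg 0 data.length] []
        (by simp only [List.map_cons, List.map_nil, List.sum_cons, List.sum_nil, wItem]; omega)
        (by intro it hit
            simp only [List.mem_singleton] at hit
            subst hit
            exact ⟨by omega, le_refl _⟩)]
  simp [renderItem, extr_full]
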